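-- pv_equiv track=rewrite | github.com/jyan500/Python-Data-Structures-And-Algos | blind 75 leetcode/contains_duplicate.py | alternativeSolution
-- ===== SOURCE A (Python) =====
-- from typing import List
--
-- def alternativeSolution(nums: List[int]) -> bool:
-- 	counter = dict()
-- 	for i in nums:
-- 		if i in counter:
-- 			return True
-- 		else:
-- 			counter[i] = 1
-- 	return False
-- ===== SOURCE B (Python) =====
-- from typing import List
--
-- def alternativeSolution(nums: List[int]) -> bool:
--     return len(set(nums)) != len(nums)
-- ===== Notes on version B (the rewrite author's own statement) =====
-- stated objective: idiomatic
-- what changed: Replaced the explicit loop with a seen-dict and early return by a single expression comparing len(set(nums)) with len(nums).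
import Mathlib
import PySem

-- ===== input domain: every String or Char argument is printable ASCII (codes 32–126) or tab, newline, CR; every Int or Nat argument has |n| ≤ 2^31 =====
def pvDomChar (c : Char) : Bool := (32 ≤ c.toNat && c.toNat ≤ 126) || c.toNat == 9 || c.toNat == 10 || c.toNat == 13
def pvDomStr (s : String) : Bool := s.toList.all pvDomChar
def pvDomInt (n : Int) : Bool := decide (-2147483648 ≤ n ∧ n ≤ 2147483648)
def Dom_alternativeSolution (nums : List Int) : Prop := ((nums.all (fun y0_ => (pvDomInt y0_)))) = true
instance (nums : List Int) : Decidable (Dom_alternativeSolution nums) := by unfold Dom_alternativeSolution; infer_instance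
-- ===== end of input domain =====

-- B replaces A's dict-scan with early return by the idiomatic len(set(nums)) != len(nums).

-- ===== PORT A =====
-- the for-loop with early 'return True' over nums, carrying the counter dict
def pvLoopA : List Int → PySem.Dict Int Int → Bool
  | [], _ => false
  | i :: rest, counter =>
      if counter.contains i then true
      else pvLoopA rest (counter.insert i 1)

def alternativeSolution (nums : List Int) : Bool :=
  pvLoopA nums PySem.Dict.empty

-- ===== PORT B =====
def alternativeSolution_alt (nums : List Int) : Bool :=
  decide ((PySem.Set.ofList nums).length ≠ nums.length)

-- ===== PRECONDITION & SPEC =====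
def Spec_alternativeSolution (nums : List Int) (out : Bool) : Prop := out = alternativeSolution_alt nums
instance (nums : List Int) (out : Bool) : Decidable (Spec_alternativeSolution nums out) := by unfold Spec_alternativeSolution; infer_instance

-- ===== CLAIM (what is proved, stated in full; the proofs are below) =====
def Claim_equal_alternativeSolution : Prop := ∀ (nums : List Int), Dom_alternativeSolution nums → Spec_alternativeSolution nums (alternativeSolution nums)

-- ===== LEMMAS AND PROOFS =====

theorem pvFoldAdd_len_le (xs : List Int) : ∀ (s : List Int),
    (xs.foldl PySem.Set.add s).length ≤ s.length + xs.length := by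
  induction xs with
  | nil => intro s; simp
  | cons x xs ih =>
      intro s
      simp only [List.foldl_cons]
      have h := ih (PySem.Set.add s x)
      have hadd : (PySem.Set.add s x).length ≤ s.length + 1 := by
        unfold PySem.Set.add
        split <;> simp
      simp only [List.length_cons]
      omega

theorem pvFoldAdd_len_iff (xs : List Int) : ∀ (s : List Int), s.Nodup →
    ((xs.foldl PySem.Set.add s).length = s.length + xs.length ↔ (s ++ xs).Nodup) := by
  induction xs with
  | nil => intro s hs; simpa using hs
  | cons x xs ih =>
      intro s hs
      simp only [List.foldl_cons]
      by_cases hx : x ∈ s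
      · have hadd : PySem.Set.add s x = s := by
          unfold PySem.Set.add
          simp [PySem.Set.contains_eq_listContains, hx]
        rw [hadd]
        constructor
        · intro h
          have := pvFoldAdd_len_le xs s
          simp only [List.length_cons] at h
          omega
        · intro h
          rw [List.nodup_append] at h
          exact absurd (h.2.2 x hx) (by simp)
      · have hadd : PySem.Set.add s x = s ++ [x] := by
          unfold PySem.Set.add
          simp [PySem.Set.contains_eq_listContains, hx]
        rw [hadd]
        have hnd : (s ++ [x]).Nodup := by
          rw [List.nodup_append]
          exact ⟨hs, List.nodup_singleton x, by simpa using fun a ha (h : a = x) => hx (h ▸ ha)⟩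
        have := ih (s ++ [x]) hnd
        have hassoc : s ++ [x] ++ xs = s ++ x :: xs := by simp
        rw [hassoc] at this
        rw [← this]
        simp only [List.length_append, List.length_cons, List.length_nil]
        omega

theorem pvOfList_len_iff (xs : List Int) :
    ((PySem.Set.ofList xs).length = xs.length ↔ xs.Nodup) := by
  have := pvFoldAdd_len_iff xs [] List.nodup_nil
  simpa [PySem.Set.ofList_eq_foldl] using this

theorem pvLoopA_iff (l : List Int) : ∀ (c : PySem.Dict Int Int), c.keys.Nodup →
    (pvLoopA l c = true ↔ ¬ (c.keys ++ l).Nodup) := by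
  induction l with
  | nil => intro c hc; simp [pvLoopA, hc]
  | cons i rest ih =>
      intro c hc
      simp only [pvLoopA]
      by_cases hmem : c.contains i = true
      · have hi : i ∈ c.keys := (PySem.Dict.contains_iff_mem_keys c i).1 hmem
        rw [if_pos hmem]
        simp only [true_iff]
        rw [List.nodup_append]
        intro h
        exact absurd (h.2.2 i hi) (by simp)
      · have hmem' : c.contains i = false := by simpa using hmem
        have hkeys : (c.insert i 1).keys = c.keys ++ [i] := by
          simpa using PySem.Dict.keys_insert_of_not_contains (d := c) (k := i) (v := 1) hmem'
        have hnd : (c.insert i 1).keys.Nodup := PySem.Dict.nodup_keys_insert _ _ _ hc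
        rw [if_neg hmem, ih (c.insert i 1) hnd, hkeys]
        have hassoc : c.keys ++ [i] ++ rest = c.keys ++ i :: rest := by simp
        rw [hassoc]

-- ===== VERDICT (by name: the statement is the Claim_ definition above) =====
theorem alternativeSolution_spec : Claim_equal_alternativeSolution := by
  intro nums _
  unfold Spec_alternativeSolution alternativeSolution alternativeSolution_alt
  have hA := pvLoopA_iff nums PySem.Dict.empty (by simp [PySem.Dict.keys_empty])
  simp only [PySem.Dict.keys_empty, List.nil_append] at hA
  have hB : (decide ((PySem.Set.ofList nums).length ≠ nums.length) = true) ↔ ¬ nums.Nodup := by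
    rw [decide_eq_true_iff]
    exact not_congr (pvOfList_len_iff nums)
  rw [Bool.eq_iff_iff, hA, hB]
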